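-- pv_equiv track=rewrite | github.com/dheerajalim/leetcode | Graph/BFS_DFS/num_of_enclaves.py | num_of_enclaves
-- ===== SOURCE A (Python) =====
-- from collections import deque
--
-- def num_of_enclaves(grid):
--     # traverse through all the cells in border
--     # add the 1's coordinates to the queue
--
--     # store the total number of 1's
--     total_land_count = 0
--
--     rows, cols = len(grid), len(grid[0])
--
--     dq = deque()
--     # to maintain the cell which can reach boundary
--     reachable_count = 0
--     # traverse through all the cell in grid
--     for r in range(rows):
--         for c in range(cols):
--             # check for all the land cells
--             if grid[r][c] == 1:
--                 # increment total land count
--                 total_land_count += 1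
--                 # if the land is boundary, add to the queue
--                 # also mark them as visisted by changing it to "True"
--                 # update reachable_count += 1 as these land an reach boundary
--                 if r in [0, rows - 1] or c in [0, cols - 1]:
--                     dq.append([r, c])
--                     grid[r][c] = "True"
--                     reachable_count += 1
--
--     # all possible 4 directions
--     directions = [[-1, 0], [1, 0], [0, -1], [0, 1]]
--
--     while dq:
--         r, c = dq.popleft()
--
--         for x, y in directions:
--             dx = r + x
--             dy = c + y
--             # if the cell is not land and is out of valid row/col or is already visited
--             # we ignore this cell
--             if dx < 0 or dx >= rows or dy < 0 or dy >= cols or grid[dx][dy] != 1 or grid[dx][dy] == "True":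
--                 continue
--             # else mark it as visited
--             # add it to the queue and increment the reachable count by 1
--             else:
--                 grid[dx][dy] = "True"
--                 dq.append([dx, dy])
--                 reachable_count += 1
--
--     # return the difference of total land and land that can reach boundary
--     # this gives land that cannot reach boundary
--     return total_land_count - reachable_count
-- ===== SOURCE B (Python) =====
-- def num_of_enclaves(grid):
--     rows, cols = len(grid), len(grid[0])
--     # count the land once
--     total = sum(1 for row in grid for c in range(cols) if row[c] == 1)
--     # monotone fixpoint: repeatedly sweep the whole grid, marking any land
--     # cell that lies on the border or touches an already-marked cell, until
--     # a full sweep changes nothing; no queue/stack or frontier is kept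
--     reach = set()
--     changed = True
--     while changed:
--         changed = False
--         for r in range(rows):
--             for c in range(cols):
--                 if grid[r][c] == 1 and (r, c) not in reach:
--                     if r == 0 or r == rows - 1 or c == 0 or c == cols - 1 \
--                             or (r - 1, c) in reach or (r + 1, c) in reach \
--                             or (r, c - 1) in reach or (r, c + 1) in reach:
--                         reach.add((r, c))
--                         changed = True
--     return total - len(reach)
-- ===== Notes on version B (the rewrite author's own statement) =====
-- stated objective: alternative
-- what changed: A runs a BFS from border land cells with a deque, marking reachable cells in-place with 'True'; B computes the reachable set as a monotone fixpoint: it repeatedly sweeps the whole grid, marking any land cell that is on the border or adjacent to an already-marked cell, until a full sweep changes nothing, keeping no queue, stack or frontier and never mutating the grid.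
import Mathlib
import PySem

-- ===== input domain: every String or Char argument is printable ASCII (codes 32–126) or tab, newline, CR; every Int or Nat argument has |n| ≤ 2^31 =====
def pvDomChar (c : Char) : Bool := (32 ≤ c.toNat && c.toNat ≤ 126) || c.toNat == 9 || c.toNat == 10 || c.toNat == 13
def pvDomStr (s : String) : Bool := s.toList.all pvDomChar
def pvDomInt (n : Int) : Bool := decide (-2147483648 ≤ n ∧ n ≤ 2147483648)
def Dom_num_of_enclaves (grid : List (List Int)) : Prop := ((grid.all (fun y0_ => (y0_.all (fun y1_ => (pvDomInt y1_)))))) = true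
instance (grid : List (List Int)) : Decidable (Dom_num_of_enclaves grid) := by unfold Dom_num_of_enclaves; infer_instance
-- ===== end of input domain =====

-- B replaces A's mark-in-place BFS (deque seeded during the scan) by a monotone fixpoint that
-- re-sweeps the whole grid until no land cell on the border or next to a marked cell is new;
-- equivalence is about the RETURN value only — A mutates its argument (marks cells "True"),
-- B leaves the grid untouched.


-- ===== PORT A =====
-- cell read of the (possibly marked) working grid: Option Int cells, none = "True"
def pvCellA (g : List (List (Option Int))) (r c : Int) : Option Int :=
  (g.getD r.toNat []).getD c.toNat (some 0)

-- grid[r][c] = "True"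
def pvMark (g : List (List (Option Int))) (r c : Int) : List (List (Option Int)) :=
  g.modify r.toNat (fun row => row.set c.toNat none)

def pvOnes (g : List (List (Option Int))) : Nat :=
  (g.map (fun row => row.countP (fun x => x == some 1))).sum

def pvDirections : List (Int × Int) := [(-1, 0), (1, 0), (0, -1), (0, 1)]

-- one direction of A's BFS body; state = (grid, dq, reachable_count)
def pvStepA (rows cols r c : Int)
    (st : List (List (Option Int)) × List (Int × Int) × Int) (d : Int × Int) :
    List (List (Option Int)) × List (Int × Int) × Int :=
  if r + d.1 < 0 ∨ rows ≤ r + d.1 ∨ c + d.2 < 0 ∨ cols ≤ c + d.2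
      ∨ pvCellA st.1 (r + d.1) (c + d.2) ≠ some 1 ∨ pvCellA st.1 (r + d.1) (c + d.2) = none
  then st
  else (pvMark st.1 (r + d.1) (c + d.2), st.2.1 ++ [(r + d.1, c + d.2)], st.2.2 + 1)

-- the 'while dq' BFS loop; returns the final reachable_count.
-- Fuel-bounded structural recursion: the fuel 'pvOnes g * 2 + dq.length' always suffices
-- (each iteration pops one queue entry and any push marks a 1-cell), so the 0-fuel branch
-- is never reached; this is a totality guard only.
def pvBfsAF (rows cols : Int) : Nat → List (List (Option Int)) → List (Int × Int) → Int → Int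
  | 0, _, _, reach => reach
  | fuel + 1, g, dq, reach =>
    match dq with
    | [] => reach
    | (r, c) :: rest =>
      let st := pvDirections.foldl (pvStepA rows cols r c) (g, rest, reach)
      pvBfsAF rows cols fuel st.1 st.2.1 st.2.2

def pvBfsA (rows cols : Int) (g : List (List (Option Int))) (dq : List (Int × Int))
    (reach : Int) : Int :=
  pvBfsAF rows cols (pvOnes g * 2 + dq.length) g dq reach

-- body of A's first double loop at cell (r, c); state = (total_land_count, dq, grid, reachable_count)
def pvScanCell (rows cols r c : Int)
    (st : Int × List (Int × Int) × List (List (Option Int)) × Int) :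
    Int × List (Int × Int) × List (List (Option Int)) × Int :=
  if pvCellA st.2.2.1 r c = some 1 then
    if r ∈ ([0, rows - 1] : List Int) ∨ c ∈ ([0, cols - 1] : List Int) then
      (st.1 + 1, st.2.1 ++ [(r, c)], pvMark st.2.2.1 r c, st.2.2.2 + 1)
    else (st.1 + 1, st.2.1, st.2.2.1, st.2.2.2)
  else st

def pvScanRow (rows cols r : Int)
    (st : Int × List (Int × Int) × List (List (Option Int)) × Int) :
    Int × List (Int × Int) × List (List (Option Int)) × Int :=
  (PySem.List.pyRange 0 cols 1).foldl (fun st c => pvScanCell rows cols r c st) st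

def num_of_enclaves (grid : List (List Int)) : Int :=
  let rows : Int := grid.length
  let cols : Int := (grid.getD 0 []).length
  let s := (PySem.List.pyRange 0 rows 1).foldl (fun st r => pvScanRow rows cols r st)
    ((0 : Int), ([] : List (Int × Int)), grid.map (fun row => row.map some), (0 : Int))
  s.1 - pvBfsA rows cols s.2.2.1 s.2.1 s.2.2.2

-- ===== PORT B =====
-- original (unmutated) grid read: grid[r][c], indexed only under 0 ≤ r < rows, 0 ≤ c < cols
def pvCellB (g : List (List Int)) (r c : Int) : Int :=
  (g.getD r.toNat []).getD c.toNat 0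

-- termination measure helper: in-range land cells not yet marked
def pvUnseen (grid : List (List Int)) (colsN : Nat) (seen : List (Int × Int)) : Nat :=
  ((List.range grid.length).map (fun (r : Nat) =>
    (List.range colsN).countP (fun (c : Nat) =>
      pvCellB grid ((r : Nat) : Int) ((c : Nat) : Int)
        == 1 && !(decide ((((r : Nat) : Int), ((c : Nat) : Int)) ∈ seen))))).sum

-- body of B's sweep at cell p; state = (reach, changed)
def pvSweepCell (grid : List (List Int)) (rows cols : Int)
    (st : List (Int × Int) × Bool) (p : Int × Int) : List (Int × Int) × Bool :=
  if pvCellB grid p.1 p.2 = 1 ∧ (p.1, p.2) ∉ st.1 then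
    if p.1 = 0 ∨ p.1 = rows - 1 ∨ p.2 = 0 ∨ p.2 = cols - 1
        ∨ (p.1 - 1, p.2) ∈ st.1 ∨ (p.1 + 1, p.2) ∈ st.1
        ∨ (p.1, p.2 - 1) ∈ st.1 ∨ (p.1, p.2 + 1) ∈ st.1
    then (PySem.Set.add st.1 (p.1, p.2), true)
    else st
  else st

-- one full sweep of B's double loop over the grid
def pvSweep (grid : List (List Int)) (rows cols : Int)
    (st : List (Int × Int) × Bool) : List (Int × Int) × Bool :=
  (PySem.List.pyRange 0 rows 1).foldl
    (fun st r => (PySem.List.pyRange 0 cols 1).foldl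
      (fun st c => pvSweepCell grid rows cols st (r, c)) st) st

-- B's 'while changed' loop: sweep until a sweep reports no change.
-- Fuel-bounded structural recursion: the fuel 'pvUnseen grid cols.toNat reach + 1' always
-- suffices (a changing sweep marks at least one new in-range land cell), so the 0-fuel
-- branch is never reached; this is a totality guard only.
def pvFixF (grid : List (List Int)) (rows cols : Int) : Nat → List (Int × Int) → List (Int × Int)
  | 0, reach => reach
  | fuel + 1, reach =>
    let st := pvSweep grid rows cols (reach, false)
    if st.2 then pvFixF grid rows cols fuel st.1 else st.1

def pvFix (grid : List (List Int)) (rows cols : Int) (reach : List (Int × Int)) :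
    List (Int × Int) :=
  pvFixF grid rows cols (pvUnseen grid cols.toNat reach + 1) reach

def num_of_enclaves_alt (grid : List (List Int)) : Int :=
  let rows : Int := grid.length
  let cols : Int := (grid.getD 0 []).length
  let total : Int := grid.foldl (fun t row =>
    (PySem.List.pyRange 0 cols 1).foldl
      (fun t c => if row.getD c.toNat 0 = 1 then t + 1 else t) t) 0
  total - (pvFix grid rows cols []).length

-- ===== PRECONDITION & SPEC =====
-- Pre_ excludes exactly the inputs on which the Python A raises IndexError: the empty grid
-- (grid[0]) and grids with a row shorter than len(grid[0]) (grid[r][c] in the first scan).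
def Pre_num_of_enclaves (grid : List (List Int)) : Prop :=
  grid ≠ [] ∧ ∀ row ∈ grid, (grid.getD 0 []).length ≤ row.length
instance (grid : List (List Int)) : Decidable (Pre_num_of_enclaves grid) := by
  unfold Pre_num_of_enclaves; infer_instance

def pvWitness_num_of_enclaves : List (List Int) := [[1, 0, 1], [0, 1, 0], [1, 1, 1]]

def Spec_num_of_enclaves (grid : List (List Int)) (out : Int) : Prop := out = num_of_enclaves_alt grid
instance (grid : List (List Int)) (out : Int) : Decidable (Spec_num_of_enclaves grid out) := by
  unfold Spec_num_of_enclaves; infer_instance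

-- ===== CLAIM (what is proved, stated in full; the proofs are below) =====
def Claim_equal_num_of_enclaves : Prop := ∀ (grid : List (List Int)), Dom_num_of_enclaves grid → Pre_num_of_enclaves grid → Spec_num_of_enclaves grid (num_of_enclaves grid)

-- ===== LEMMAS AND PROOFS =====

theorem pvCellA_one_bounds {g : List (List (Option Int))} {r c : Int}
    (h : pvCellA g r c = some 1) :
    r.toNat < g.length ∧ c.toNat < (g.getD r.toNat []).length := by
  unfold pvCellA at h
  constructor
  · by_contra hh
    rw [List.getD_eq_default _ _ (Nat.le_of_not_lt hh)] at h
    simp at h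
  · by_contra hh
    rw [List.getD_eq_default _ _ (Nat.le_of_not_lt hh)] at h
    simp at h

theorem pvOnes_mark {g : List (List (Option Int))} {r c : Int}
    (h : pvCellA g r c = some 1) : pvOnes (pvMark g r c) + 1 = pvOnes g := by
  obtain ⟨hr, hc⟩ := pvCellA_one_bounds h
  unfold pvCellA at h
  unfold pvOnes pvMark
  rw [List.getD_eq_getElem _ _ hr] at h hc
  rw [List.getD_eq_getElem _ _ hc] at h
  rw [List.modify_eq_set, List.getElem?_eq_getElem hr, Option.getD_some, List.map_set]
  have hlen : r.toNat < (g.map (fun row => row.countP (fun x => x == some 1))).length := by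
    simpa using hr
  rw [List.sum_set, if_pos hlen]
  conv_rhs => rw [← List.sum_take_add_sum_drop
    (g.map (fun row => row.countP (fun x => x == some 1))) r.toNat]
  rw [List.drop_eq_getElem_cons hlen, List.sum_cons, List.getElem_map]
  have hpos : 0 < g[r.toNat].countP (fun x => x == some 1) := by
    have hz := List.countP_eq_zero (p := fun x => x == some 1) (l := g[r.toNat])
    by_contra hh
    have h0 : g[r.toNat].countP (fun x => x == some 1) = 0 := by omega
    exact absurd (hz.mp h0 _ (List.getElem_mem hc)) (by simp [h])
  rw [List.countP_set hc, h]
  simp only [beq_self_eq_true, if_pos]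
  simp
  omega

theorem pvStepA_measure (rows cols r c : Int)
    (st : List (List (Option Int)) × List (Int × Int) × Int) (d : Int × Int) :
    pvOnes (pvStepA rows cols r c st d).1 * 2 + (pvStepA rows cols r c st d).2.1.length
      ≤ pvOnes st.1 * 2 + st.2.1.length := by
  unfold pvStepA
  split
  · exact le_refl _
  · rename_i hcond
    push Not at hcond
    have h1 := pvOnes_mark hcond.2.2.2.2.1
    simp only [List.length_append, List.length_cons, List.length_nil]
    omega

theorem pvFoldA_measure (rows cols r c : Int) (l : List (Int × Int)) :
    ∀ st, pvOnes (l.foldl (pvStepA rows cols r c) st).1 * 2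
        + (l.foldl (pvStepA rows cols r c) st).2.1.length
      ≤ pvOnes st.1 * 2 + st.2.1.length := by
  induction l with
  | nil => intro st; exact le_refl _
  | cons d l ih =>
    intro st
    exact le_trans (ih _) (pvStepA_measure rows cols r c st d)

theorem pvCountPFlip {α : Type} {l : List α} (hnd : l.Nodup) {a : α} (ha : a ∈ l)
    {p q : α → Bool} (hpa : p a = true) (hqa : q a = false)
    (hagree : ∀ x ∈ l, x ≠ a → p x = q x) : l.countP q + 1 = l.countP p := by
  induction l with
  | nil => cases ha
  | cons x xs ih =>
    rw [List.countP_cons, List.countP_cons]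
    rcases List.mem_cons.mp ha with rfl | hmem
    · rw [hpa, hqa]
      have : xs.countP p = xs.countP q := by
        apply List.countP_congr
        intro y hy
        rw [hagree y (List.mem_cons_of_mem _ hy) (fun e => (List.nodup_cons.mp hnd).1 (e ▸ hy))]
      simp only [Bool.false_eq_true, if_false, if_true]
      omega
    · have hxa : x ≠ a := fun e => (List.nodup_cons.mp hnd).1 (e ▸ hmem)
      rw [hagree x (List.mem_cons_self) hxa]
      have := ih (List.nodup_cons.mp hnd).2 hmem
        (fun y hy hne => hagree y (List.mem_cons_of_mem _ hy) hne)
      omega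

theorem pvSumMapSuccAt {f g : Nat → Nat} :
    ∀ n i, i < n → g i + 1 = f i → (∀ j < n, j ≠ i → g j = f j) →
    ((List.range n).map g).sum + 1 = ((List.range n).map f).sum := by
  intro n
  induction n with
  | zero => intro i hi _ _; omega
  | succ m ih =>
    intro i hi h hne
    rw [List.range_succ, List.map_append, List.map_append, List.sum_append, List.sum_append]
    simp only [List.map_cons, List.map_nil, List.sum_cons, List.sum_nil]
    rcases Nat.lt_or_ge i m with him | him
    · rw [hne m (by omega) (by omega)]
      have := ih i him h (fun j hj hjne => hne j (by omega) hjne)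
      omega
    · have hieq : i = m := by omega
      subst hieq
      have hmap : (List.range i).map g = (List.range i).map f := by
        apply List.map_congr_left
        intro j hj
        exact hne j (by simp at hj; omega) (by simp at hj; omega)
      rw [hmap]
      omega

theorem pvCellB_one_bounds {g : List (List Int)} {r c : Int}
    (h : pvCellB g r c = 1) : r.toNat < g.length ∧ c.toNat < (g.getD r.toNat []).length := by
  unfold pvCellB at h
  constructor
  · by_contra hh
    rw [List.getD_eq_default _ _ (Nat.le_of_not_lt hh)] at h
    simp at h
  · by_contra hh
    rw [List.getD_eq_default _ _ (Nat.le_of_not_lt hh)] at h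
    simp at h

theorem pvUnseen_add {grid : List (List Int)} {cols : Int} {seen : List (Int × Int)}
    {r c : Int} (h0r : 0 ≤ r) (hrc : c < cols) (h0c : 0 ≤ c)
    (hcell : pvCellB grid r c = 1) (hns : (r, c) ∉ seen) :
    pvUnseen grid cols.toNat (PySem.Set.add seen (r, c)) + 1 = pvUnseen grid cols.toNat seen := by
  obtain ⟨hr, _⟩ := pvCellB_one_bounds hcell
  have er : ((r.toNat : Int)) = r := Int.toNat_of_nonneg h0r
  have ec : ((c.toNat : Int)) = c := Int.toNat_of_nonneg h0c
  unfold pvUnseen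
  rw [PySem.Set.add_of_not_mem hns]
  apply pvSumMapSuccAt _ r.toNat hr
  · apply pvCountPFlip (List.nodup_range) (a := c.toNat)
    · simp
      omega
    · simp [er, ec, hcell, hns]
    · simp [er, ec]
    · intro x hx hxne
      have hmem : (((r.toNat : Int), (x : Int)) ∈ seen ++ [(r, c)]) ↔
          (((r.toNat : Int), (x : Int)) ∈ seen) := by
        rw [List.mem_append]
        constructor
        · rintro (hm | hm)
          · exact hm
          · exfalso
            simp at hm
            exact hxne (by omega)
        · exact Or.inl
      simp only [hmem]
  · intro j hj hjne
    apply List.countP_congr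
    intro x hx
    have hmem : (((j : Int), (x : Int)) ∈ seen ++ [(r, c)]) ↔
        (((j : Int), (x : Int)) ∈ seen) := by
      rw [List.mem_append]
      constructor
      · rintro (hm | hm)
        · exact hm
        · exfalso
          simp at hm
          omega
      · exact Or.inl
    simp only [hmem]

theorem pvFoldTriple {α : Type} (u : List (Int × Int) → Nat)
    (f : List (Int × Int) × Bool → α → List (Int × Int) × Bool) :
    ∀ (l : List α),
      (∀ a ∈ l, ∀ st, u (f st a).1 ≤ u st.1 ∧ (st.2 = true → (f st a).2 = true) ∧
        ((f st a).2 = true → st.2 = true ∨ u (f st a).1 < u st.1)) →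
      ∀ st, u (l.foldl f st).1 ≤ u st.1 ∧ (st.2 = true → (l.foldl f st).2 = true) ∧
        ((l.foldl f st).2 = true → st.2 = true ∨ u (l.foldl f st).1 < u st.1) := by
  intro l
  induction l with
  | nil => intro _ st; exact ⟨le_refl _, id, Or.inl⟩
  | cons a l ih =>
    intro h st
    obtain ⟨h1, h2, h3⟩ := h a List.mem_cons_self st
    obtain ⟨g1, g2, g3⟩ := ih (fun b hb => h b (List.mem_cons_of_mem _ hb)) (f st a)
    rw [List.foldl_cons]
    refine ⟨le_trans g1 h1, fun hs => g2 (h2 hs), fun hs => ?_⟩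
    rcases g3 hs with hf | hf
    · rcases h3 hf with h' | h'
      · exact Or.inl h'
      · exact Or.inr (lt_of_le_of_lt g1 h')
    · exact Or.inr (lt_of_lt_of_le hf h1)

theorem pvSweepCell_dec (grid : List (List Int)) (rows cols : Int) (p : Int × Int)
    (h0r : 0 ≤ p.1) (h0c : 0 ≤ p.2) (hclt : p.2 < cols) (st : List (Int × Int) × Bool) :
    pvUnseen grid cols.toNat (pvSweepCell grid rows cols st p).1 ≤ pvUnseen grid cols.toNat st.1 ∧
    (st.2 = true → (pvSweepCell grid rows cols st p).2 = true) ∧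
    ((pvSweepCell grid rows cols st p).2 = true → st.2 = true ∨
      pvUnseen grid cols.toNat (pvSweepCell grid rows cols st p).1 < pvUnseen grid cols.toNat st.1) := by
  unfold pvSweepCell
  split
  · rename_i h1
    split
    · have hdec := pvUnseen_add (grid := grid) (cols := cols) (seen := st.1)
        h0r hclt h0c h1.1 h1.2
      exact ⟨by dsimp only; omega, fun _ => rfl, fun _ => Or.inr (by dsimp only; omega)⟩
    · exact ⟨le_refl _, fun h => h, fun h => Or.inl h⟩
  · exact ⟨le_refl _, fun h => h, fun h => Or.inl h⟩

theorem pvSweep_dec (grid : List (List Int)) (rows cols : Int) (st : List (Int × Int) × Bool) :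
    pvUnseen grid cols.toNat (pvSweep grid rows cols st).1 ≤ pvUnseen grid cols.toNat st.1 ∧
    (st.2 = true → (pvSweep grid rows cols st).2 = true) ∧
    ((pvSweep grid rows cols st).2 = true → st.2 = true ∨
      pvUnseen grid cols.toNat (pvSweep grid rows cols st).1 < pvUnseen grid cols.toNat st.1) := by
  unfold pvSweep
  refine pvFoldTriple (pvUnseen grid cols.toNat) _ _ ?_ st
  intro r hr st'
  refine pvFoldTriple (pvUnseen grid cols.toNat) _ _ ?_ st'
  intro c hc st''
  obtain ⟨hc0, hclt⟩ := PySem.List.mem_pyRange_one.mp hc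
  obtain ⟨hr0, _⟩ := PySem.List.mem_pyRange_one.mp hr
  exact pvSweepCell_dec grid rows cols (r, c) hr0 hc0 hclt st''


-- land cell of the ORIGINAL grid, in bounds of rows x cols
def pvLand (G : List (List Int)) (p : Int × Int) : Prop :=
  0 ≤ p.1 ∧ p.1 < (G.length : Int) ∧ 0 ≤ p.2 ∧ p.2 < ((G.getD 0 []).length : Int) ∧
    pvCellB G p.1 p.2 = 1

def pvBorder (G : List (List Int)) (p : Int × Int) : Prop :=
  p.1 = 0 ∨ p.1 = (G.length : Int) - 1 ∨ p.2 = 0 ∨ p.2 = ((G.getD 0 []).length : Int) - 1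

def pvAdj (p q : Int × Int) : Prop :=
  q = (p.1 - 1, p.2) ∨ q = (p.1 + 1, p.2) ∨ q = (p.1, p.2 - 1) ∨ q = (p.1, p.2 + 1)

-- land cells connected to a border land cell through land (what both traversals collect)
inductive pvReach (G : List (List Int)) : Int × Int → Prop
  | base (p : Int × Int) : pvLand G p → pvBorder G p → pvReach G p
  | step (p q : Int × Int) : pvReach G p → pvAdj p q → pvLand G q → pvReach G q

theorem pvLand_iff {G : List (List Int)} {rows cols : Int} {r c : Int}
    (hrows : rows = (G.length : Int)) (hcols : cols = ((G.getD 0 []).length : Int)) :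
    (0 ≤ r ∧ r < rows ∧ 0 ≤ c ∧ c < cols ∧ pvCellB G r c = 1) ↔ pvLand G (r, c) := by
  subst hrows hcols
  unfold pvLand
  tauto

-- ===== B side: the sweep fixpoint collects exactly the reachable set =====
theorem pvFoldInv {α : Type} (P : List (Int × Int) × Bool → Prop)
    (f : List (Int × Int) × Bool → α → List (Int × Int) × Bool) :
    ∀ (l : List α), (∀ a ∈ l, ∀ st, P st → P (f st a)) → ∀ st, P st → P (l.foldl f st) := by
  intro l
  induction l with
  | nil => intro _ st h; exact h
  | cons a l ih =>
    intro h st hP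
    exact ih (fun b hb => h b (List.mem_cons_of_mem _ hb)) (f st a)
      (h a List.mem_cons_self st hP)

theorem pvSweepCell_sound (G : List (List Int)) (p : Int × Int)
    (h0r : 0 ≤ p.1) (hrlt : p.1 < (G.length : Int)) (h0c : 0 ≤ p.2)
    (hclt : p.2 < ((G.getD 0 []).length : Int)) (st : List (Int × Int) × Bool)
    (h : st.1.Nodup ∧ ∀ x ∈ st.1, pvReach G x) :
    (pvSweepCell G (G.length : Int) ((G.getD 0 []).length : Int) st p).1.Nodup ∧
    ∀ x ∈ (pvSweepCell G (G.length : Int) ((G.getD 0 []).length : Int) st p).1, pvReach G x := by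
  unfold pvSweepCell
  split
  · rename_i h1
    split
    · rename_i h2
      refine ⟨PySem.Set.nodup_add _ _ h.1, ?_⟩
      intro x hx
      rcases (PySem.Set.mem_add _ _ _).mp hx with hx | rfl
      · exact h.2 x hx
      · have hL : pvLand G (p.1, p.2) := ⟨h0r, hrlt, h0c, hclt, h1.1⟩
        rcases h2 with hB | hB | hB | hB | hN | hN | hN | hN
        · exact pvReach.base _ hL (Or.inl hB)
        · exact pvReach.base _ hL (Or.inr (Or.inl hB))
        · exact pvReach.base _ hL (Or.inr (Or.inr (Or.inl hB)))
        · exact pvReach.base _ hL (Or.inr (Or.inr (Or.inr hB)))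
        · exact pvReach.step _ _ (h.2 _ hN) (Or.inr (Or.inl (by rw [sub_add_cancel]))) hL
        · exact pvReach.step _ _ (h.2 _ hN) (Or.inl (by rw [add_sub_cancel_right])) hL
        · exact pvReach.step _ _ (h.2 _ hN) (Or.inr (Or.inr (Or.inr (by rw [sub_add_cancel])))) hL
        · exact pvReach.step _ _ (h.2 _ hN) (Or.inr (Or.inr (Or.inl (by rw [add_sub_cancel_right])))) hL
    · exact h
  · exact h

theorem pvSweep_sound (G : List (List Int)) (st : List (Int × Int) × Bool)
    (h : st.1.Nodup ∧ ∀ x ∈ st.1, pvReach G x) :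
    (pvSweep G (G.length : Int) ((G.getD 0 []).length : Int) st).1.Nodup ∧
    ∀ x ∈ (pvSweep G (G.length : Int) ((G.getD 0 []).length : Int) st).1, pvReach G x := by
  unfold pvSweep
  refine pvFoldInv (fun st => st.1.Nodup ∧ ∀ x ∈ st.1, pvReach G x) _ _ ?_ st h
  intro r hr st' hP
  refine pvFoldInv (fun st => st.1.Nodup ∧ ∀ x ∈ st.1, pvReach G x) _ _ ?_ st' hP
  intro c hc st'' hP'
  obtain ⟨hr0, hrlt⟩ := PySem.List.mem_pyRange_one.mp hr
  obtain ⟨hc0, hclt⟩ := PySem.List.mem_pyRange_one.mp hc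
  exact pvSweepCell_sound G (r, c) hr0 hrlt hc0 hclt st'' hP'

theorem pvSweepCell_mono (G : List (List Int)) (rows cols : Int) (p : Int × Int)
    (st : List (Int × Int) × Bool) (h : st.2 = true) :
    (pvSweepCell G rows cols st p).2 = true := by
  unfold pvSweepCell
  split
  · split
    · rfl
    · exact h
  · exact h

theorem pvSweepCell_id (G : List (List Int)) (rows cols : Int) (p : Int × Int)
    (st : List (Int × Int) × Bool) (h : (pvSweepCell G rows cols st p).2 = false) :
    pvSweepCell G rows cols st p = st := by
  unfold pvSweepCell at h ⊢
  by_cases h1 : pvCellB G p.1 p.2 = 1 ∧ (p.1, p.2) ∉ st.1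
  · rw [if_pos h1] at h ⊢
    by_cases h2 : p.1 = 0 ∨ p.1 = rows - 1 ∨ p.2 = 0 ∨ p.2 = cols - 1
        ∨ (p.1 - 1, p.2) ∈ st.1 ∨ (p.1 + 1, p.2) ∈ st.1
        ∨ (p.1, p.2 - 1) ∈ st.1 ∨ (p.1, p.2 + 1) ∈ st.1
    · rw [if_pos h2] at h
      simp at h
    · rw [if_neg h2]
  · rw [if_neg h1]

theorem pvFoldMono {α : Type} (f : List (Int × Int) × Bool → α → List (Int × Int) × Bool)
    (hmono : ∀ (a : α) st, st.2 = true → (f st a).2 = true) :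
    ∀ (l : List α) st, st.2 = true → (l.foldl f st).2 = true := by
  intro l
  induction l with
  | nil => intro st h; exact h
  | cons a l ih => intro st h; exact ih (f st a) (hmono a st h)

theorem pvFoldStable {α : Type} (f : List (Int × Int) × Bool → α → List (Int × Int) × Bool)
    (hmono : ∀ (a : α) st, st.2 = true → (f st a).2 = true)
    (hid : ∀ (a : α) st, (f st a).2 = false → f st a = st) :
    ∀ (l : List α) st, (l.foldl f st).2 = false →
      l.foldl f st = st ∧ ∀ a ∈ l, f st a = st := by
  intro l
  induction l with
  | nil => intro st _; exact ⟨rfl, fun a ha => absurd ha (List.not_mem_nil)⟩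
  | cons a l ih =>
    intro st h
    rw [List.foldl_cons] at h
    have hfa : (f st a).2 = false := by
      rcases Bool.eq_false_or_eq_true (f st a).2 with hb | hb
      · rw [pvFoldMono f hmono l (f st a) hb] at h
        cases h
      · exact hb
    have he : f st a = st := hid a st hfa
    rw [List.foldl_cons, he]
    rw [he] at h
    obtain ⟨h1, h2⟩ := ih st h
    exact ⟨h1, fun b hb => (List.mem_cons.mp hb).elim (fun e => e ▸ he) (fun hb' => h2 b hb')⟩

theorem pvSweep_stable (G : List (List Int)) (rows cols : Int) (R : List (Int × Int))
    (h : (pvSweep G rows cols (R, false)).2 = false) :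
    pvSweep G rows cols (R, false) = (R, false) ∧
    ∀ r ∈ PySem.List.pyRange 0 rows 1, ∀ c ∈ PySem.List.pyRange 0 cols 1,
      pvSweepCell G rows cols (R, false) (r, c) = (R, false) := by
  have hmonoI : ∀ (r : Int) (st : List (Int × Int) × Bool), st.2 = true →
      ((PySem.List.pyRange 0 cols 1).foldl
        (fun st c => pvSweepCell G rows cols st (r, c)) st).2 = true :=
    fun r st hs => pvFoldMono _ (fun c st' => pvSweepCell_mono G rows cols (r, c) st') _ st hs
  have hidI : ∀ (r : Int) (st : List (Int × Int) × Bool),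
      ((PySem.List.pyRange 0 cols 1).foldl
        (fun st c => pvSweepCell G rows cols st (r, c)) st).2 = false →
      (PySem.List.pyRange 0 cols 1).foldl
        (fun st c => pvSweepCell G rows cols st (r, c)) st = st :=
    fun r st hs => (pvFoldStable _ (fun c st' => pvSweepCell_mono G rows cols (r, c) st')
      (fun c st' => pvSweepCell_id G rows cols (r, c) st') _ st hs).1
  unfold pvSweep at h ⊢
  obtain ⟨heq, houter⟩ := pvFoldStable _ hmonoI hidI _ (R, false) h
  refine ⟨heq, ?_⟩
  intro r hr c hc
  have hinner : (PySem.List.pyRange 0 cols 1).foldl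
      (fun st c => pvSweepCell G rows cols st (r, c)) (R, false) = (R, false) := houter r hr
  have hflag : ((PySem.List.pyRange 0 cols 1).foldl
      (fun st c => pvSweepCell G rows cols st (r, c)) (R, false)).2 = false := by
    rw [hinner]
  exact (pvFoldStable _ (fun c st' => pvSweepCell_mono G rows cols (r, c) st')
    (fun c st' => pvSweepCell_id G rows cols (r, c) st') _ (R, false) hflag).2 c hc

theorem pvCell_stable_mem (G : List (List Int)) (reach : List (Int × Int)) (q : Int × Int)
    (hL : pvLand G q)
    (hst : pvSweepCell G (G.length : Int) ((G.getD 0 []).length : Int) (reach, false) (q.1, q.2)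
      = (reach, false))
    (hcond : q.1 = 0 ∨ q.1 = (G.length : Int) - 1 ∨ q.2 = 0 ∨ q.2 = ((G.getD 0 []).length : Int) - 1
      ∨ (q.1 - 1, q.2) ∈ reach ∨ (q.1 + 1, q.2) ∈ reach
      ∨ (q.1, q.2 - 1) ∈ reach ∨ (q.1, q.2 + 1) ∈ reach) :
    q ∈ reach := by
  by_contra hm
  unfold pvSweepCell at hst
  rw [if_pos ⟨hL.2.2.2.2, by simpa using hm⟩, if_pos hcond] at hst
  have := congrArg Prod.snd hst
  simp at this

theorem pvSweep_closed (G : List (List Int)) (reach : List (Int × Int))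
    (h : (pvSweep G (G.length : Int) ((G.getD 0 []).length : Int) (reach, false)).2 = false) :
    ∀ q, pvReach G q → q ∈ reach := by
  have hstab := (pvSweep_stable G (G.length : Int) ((G.getD 0 []).length : Int) reach h).2
  intro q hq
  induction hq with
  | base p hL hB =>
    apply pvCell_stable_mem G reach p hL
    · exact hstab p.1 (PySem.List.mem_pyRange_one.mpr ⟨hL.1, hL.2.1⟩)
        p.2 (PySem.List.mem_pyRange_one.mpr ⟨hL.2.2.1, hL.2.2.2.1⟩)
    · rcases hB with hb | hb | hb | hb
      · exact Or.inl hb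
      · exact Or.inr (Or.inl hb)
      · exact Or.inr (Or.inr (Or.inl hb))
      · exact Or.inr (Or.inr (Or.inr (Or.inl hb)))
  | step p q hpR hadj hL ihp =>
    apply pvCell_stable_mem G reach q hL
    · exact hstab q.1 (PySem.List.mem_pyRange_one.mpr ⟨hL.1, hL.2.1⟩)
        q.2 (PySem.List.mem_pyRange_one.mpr ⟨hL.2.2.1, hL.2.2.2.1⟩)
    · rcases hadj with rfl | rfl | rfl | rfl
      · -- q = (p.1 - 1, p.2): p = (q.1 + 1, q.2)
        refine Or.inr (Or.inr (Or.inr (Or.inr (Or.inr (Or.inl ?_)))))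
        have : ((p.1 - 1 + 1 : Int), p.2) = p := by rw [sub_add_cancel]
        simpa [this] using ihp
      · refine Or.inr (Or.inr (Or.inr (Or.inr (Or.inl ?_))))
        have : ((p.1 + 1 - 1 : Int), p.2) = p := by rw [add_sub_cancel_right]
        simpa [this] using ihp
      · refine Or.inr (Or.inr (Or.inr (Or.inr (Or.inr (Or.inr (Or.inr ?_))))))
        have : ((p.1 : Int), p.2 - 1 + 1) = p := by rw [sub_add_cancel]
        simpa [this] using ihp
      · refine Or.inr (Or.inr (Or.inr (Or.inr (Or.inr (Or.inr (Or.inl ?_))))))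
        have : ((p.1 : Int), p.2 + 1 - 1) = p := by rw [add_sub_cancel_right]
        simpa [this] using ihp

theorem pvFixF_spec (G : List (List Int)) :
    ∀ (fuel : Nat) (reach : List (Int × Int)), reach.Nodup → (∀ p ∈ reach, pvReach G p) →
      pvUnseen G ((G.getD 0 []).length : Int).toNat reach < fuel →
      (pvFixF G (G.length : Int) ((G.getD 0 []).length : Int) fuel reach).Nodup ∧
      ∀ p, p ∈ pvFixF G (G.length : Int) ((G.getD 0 []).length : Int) fuel reach ↔ pvReach G p := by
  intro fuel
  induction fuel with
  | zero => intro reach _ _ hf; exact absurd hf (Nat.not_lt_zero _)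
  | succ fuel ih =>
    intro reach hnd hR hf
    rw [pvFixF]
    by_cases hc : (pvSweep G (G.length : Int) ((G.getD 0 []).length : Int) (reach, false)).2 = true
    · rw [if_pos hc]
      obtain ⟨hnd', hR'⟩ := pvSweep_sound G (reach, false) ⟨hnd, hR⟩
      apply ih _ hnd' hR'
      rcases (pvSweep_dec G (G.length : Int) ((G.getD 0 []).length : Int) (reach, false)).2.2 hc
        with h' | h'
      · simp at h'
      · have h2 : pvUnseen G ((G.getD 0 []).length : Int).toNat ((reach, false) : List (Int × Int) × Bool).1
            = pvUnseen G ((G.getD 0 []).length : Int).toNat reach := rfl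
        omega
    · rw [if_neg hc]
      have hflag : (pvSweep G (G.length : Int) ((G.getD 0 []).length : Int) (reach, false)).2
          = false := by
        rcases Bool.eq_false_or_eq_true
          (pvSweep G (G.length : Int) ((G.getD 0 []).length : Int) (reach, false)).2 with hb | hb
        · exact absurd hb hc
        · exact hb
      have heq := (pvSweep_stable G (G.length : Int) ((G.getD 0 []).length : Int) reach hflag).1
      rw [show (pvSweep G (G.length : Int) ((G.getD 0 []).length : Int) (reach, false)).1 = reach
        from congrArg Prod.fst heq]
      exact ⟨hnd, fun p => ⟨hR p, pvSweep_closed G reach hflag p⟩⟩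

theorem pvFix_spec (G : List (List Int)) :
    ∀ reach : List (Int × Int), reach.Nodup → (∀ p ∈ reach, pvReach G p) →
      (pvFix G (G.length : Int) ((G.getD 0 []).length : Int) reach).Nodup ∧
      ∀ p, p ∈ pvFix G (G.length : Int) ((G.getD 0 []).length : Int) reach ↔ pvReach G p := by
  intro reach hnd hR
  unfold pvFix
  exact pvFixF_spec G _ reach hnd hR (Nat.lt_succ_self _)

-- ===== A side: the scan + BFS count exactly the reachable set =====
-- the working grid g is the original G with exactly the cells of M overwritten by "True"
def pvMarkInv (G : List (List Int)) (M : List (Int × Int)) (g : List (List (Option Int))) : Prop :=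
  ∀ r c : Nat, (g.getD r []).getD c (some 0) =
    if ((r : Int), (c : Int)) ∈ M then none else some ((G.getD r []).getD c 0)

theorem pvMarkInv_init (G : List (List Int)) :
    pvMarkInv G [] (G.map (fun row => row.map some)) := by
  intro r c
  simp only [List.not_mem_nil, if_false]
  rw [show ([] : List (Option Int)) = List.map some [] from rfl, List.getD_map,
    show (some (0 : Int)) = some (0 : Int) from rfl, List.getD_map]

theorem pvMarkInv_read {G : List (List Int)} {M : List (Int × Int)}
    {g : List (List (Option Int))} (hinv : pvMarkInv G M g) {r c : Int}
    (h0r : 0 ≤ r) (h0c : 0 ≤ c) :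
    pvCellA g r c = if (r, c) ∈ M then none else some (pvCellB G r c) := by
  have er : ((r.toNat : Int)) = r := Int.toNat_of_nonneg h0r
  have ec : ((c.toNat : Int)) = c := Int.toNat_of_nonneg h0c
  have := hinv r.toNat c.toNat
  rw [er, ec] at this
  exact this

theorem pvMarkInv_mark {G : List (List Int)} {M : List (Int × Int)}
    {g : List (List (Option Int))} (hinv : pvMarkInv G M g) {r c : Int}
    (h0r : 0 ≤ r) (h0c : 0 ≤ c) (hcell : pvCellA g r c = some 1) :
    pvMarkInv G (M ++ [(r, c)]) (pvMark g r c) := by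
  obtain ⟨hr, hc⟩ := pvCellA_one_bounds hcell
  have er : ((r.toNat : Int)) = r := Int.toNat_of_nonneg h0r
  have ec : ((c.toNat : Int)) = c := Int.toNat_of_nonneg h0c
  intro r' c'
  have hgetrow : (pvMark g r c).getD r' [] =
      if r.toNat = r' then (g.getD r' []).set c.toNat none else g.getD r' [] := by
    unfold pvMark
    by_cases hr' : r' < g.length
    · rw [List.getD_eq_getElem _ _ (by simpa using hr'), List.getD_eq_getElem _ _ hr',
        List.getElem_modify]
    · have h2 : g.getD r' [] = [] := List.getD_eq_default _ _ (Nat.le_of_not_lt hr')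
      rw [List.getD_eq_default _ _ (by simpa using Nat.le_of_not_lt hr'), h2]
      split <;> rfl
  by_cases heq : r' = r.toNat ∧ c' = c.toNat
  · obtain ⟨rfl, rfl⟩ := heq
    rw [hgetrow, if_pos rfl]
    rw [List.getD_eq_getElem _ _ (by simpa using hc), List.getElem_set_self,
      if_pos (by simp [er, ec])]
  · have hne : ((r' : Int), (c' : Int)) ≠ (r, c) := by
      intro e
      apply heq
      constructor
      · have := congrArg Prod.fst e; simp at this; omega
      · have := congrArg Prod.snd e; simp at this; omega
    have hmemeq : (((r' : Int), (c' : Int)) ∈ M ++ [(r, c)]) ↔ (((r' : Int), (c' : Int)) ∈ M) := by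
      rw [List.mem_append]
      constructor
      · rintro (hm | hm)
        · exact hm
        · exact absurd (List.mem_singleton.mp hm) hne
      · exact Or.inl
    rw [hgetrow]
    by_cases hr' : r.toNat = r'
    · subst hr'
      have hcc : c' ≠ c.toNat := fun e => heq ⟨rfl, e⟩
      rw [if_pos rfl, List.getD_eq_getElem?_getD, List.getElem?_set_ne (Ne.symm hcc),
        ← List.getD_eq_getElem?_getD]
      rw [hinv r.toNat c']
      simp only [hmemeq]
    · rw [if_neg hr', hinv r' c']
      simp only [hmemeq]

-- invariant of A's BFS inner fold over the four directions, processing popped cell p0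
def pvStInv (G : List (List Int)) (p0 : Int × Int) (done : List (Int × Int))
    (st : List (List (Option Int)) × List (Int × Int) × Int) : Prop :=
  ∃ M : List (Int × Int), pvMarkInv G M st.1 ∧ M.Nodup ∧ p0 ∈ M ∧
    (∀ p ∈ M, pvReach G p) ∧ (∀ q ∈ st.2.1, q ∈ M) ∧
    (∀ q, pvLand G q → pvBorder G q → q ∈ M) ∧
    (∀ p ∈ M, p ∉ st.2.1 → p ≠ p0 → ∀ q, pvAdj p q → pvLand G q → q ∈ M) ∧
    (∀ d ∈ done, pvLand G (p0.1 + d.1, p0.2 + d.2) → (p0.1 + d.1, p0.2 + d.2) ∈ M) ∧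
    st.2.2 = (M.length : Int)

theorem pvStepA_inv {G : List (List Int)} {p0 : Int × Int} {done : List (Int × Int)}
    {st : List (List (Option Int)) × List (Int × Int) × Int} {d : Int × Int}
    (hd : d ∈ pvDirections) (h : pvStInv G p0 done st) :
    pvStInv G p0 (done ++ [d])
      (pvStepA (G.length : Int) ((G.getD 0 []).length : Int) p0.1 p0.2 st d) := by
  obtain ⟨M, hmi, hnd, hp0, hRe, hdq, hbd, h4, hdone, hcnt⟩ := h
  unfold pvStepA
  split
  · rename_i hG
    refine ⟨M, hmi, hnd, hp0, hRe, hdq, hbd, h4, ?_, hcnt⟩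
    intro d' hd' hLq
    rcases List.mem_append.mp hd' with hd' | hd'
    · exact hdone d' hd' hLq
    · have hdd : d' = d := List.mem_singleton.mp hd'
      subst hdd
      -- the guard skipped this neighbour: it must already be marked
      obtain ⟨hb1, hb2, hb3, hb4, hb5⟩ := hLq
      dsimp only at hb1 hb2 hb3 hb4 hb5
      rcases hG with hg | hg | hg | hg | hg | hg
      · omega
      · omega
      · omega
      · omega
      · by_cases hm : (p0.1 + d'.1, p0.2 + d'.2) ∈ M
        · exact hm
        · exfalso
          apply hg
          rw [pvMarkInv_read hmi hb1 hb3, if_neg hm, hb5]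
      · by_cases hm : (p0.1 + d'.1, p0.2 + d'.2) ∈ M
        · exact hm
        · exfalso
          rw [pvMarkInv_read hmi hb1 hb3, if_neg hm] at hg
          cases hg
  · rename_i hG
    push Not at hG
    obtain ⟨hb1, hb2, hb3, hb4, hcell, -⟩ := hG
    have h01 : (0 : Int) ≤ p0.1 + d.1 := hb1
    have h02 : (0 : Int) ≤ p0.2 + d.2 := hb3
    have hread := pvMarkInv_read hmi h01 h02 (M := M)
    have hqM : (p0.1 + d.1, p0.2 + d.2) ∉ M := by
      intro hm
      rw [hcell] at hread
      rw [if_pos hm] at hread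
      cases hread
    have hcB : pvCellB G (p0.1 + d.1) (p0.2 + d.2) = 1 := by
      rw [hcell, if_neg hqM] at hread
      exact Option.some.inj hread.symm ▸ rfl
    have hLq : pvLand G (p0.1 + d.1, p0.2 + d.2) :=
      (pvLand_iff rfl rfl).mp ⟨h01, by omega, h02, by omega, hcB⟩
    have hadj : pvAdj p0 (p0.1 + d.1, p0.2 + d.2) := by
      simp only [pvDirections, List.mem_cons, List.not_mem_nil, or_false] at hd
      rcases hd with rfl | rfl | rfl | rfl
      · exact Or.inl (by simp; omega)
      · exact Or.inr (Or.inl (by simp))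
      · exact Or.inr (Or.inr (Or.inl (by simp; omega)))
      · exact Or.inr (Or.inr (Or.inr (by simp)))
    refine ⟨M ++ [(p0.1 + d.1, p0.2 + d.2)], pvMarkInv_mark hmi h01 h02 hcell, ?_, ?_, ?_, ?_, ?_, ?_, ?_, ?_⟩
    · exact List.Nodup.append hnd (List.nodup_singleton _)
        (fun a ha hb => hqM (by rwa [List.mem_singleton.mp hb] at ha))
    · exact List.mem_append.mpr (Or.inl hp0)
    · intro p hp
      rcases List.mem_append.mp hp with hp | hp
      · exact hRe p hp
      · rw [List.mem_singleton.mp hp]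
        exact pvReach.step _ _ (hRe p0 hp0) hadj hLq
    · intro q hq
      rcases List.mem_append.mp hq with hq | hq
      · exact List.mem_append.mpr (Or.inl (hdq q hq))
      · exact List.mem_append.mpr (Or.inr hq)
    · intro q hLq' hBq'
      exact List.mem_append.mpr (Or.inl (hbd q hLq' hBq'))
    · intro p hp hpdq hpne q hq hLq'
      rcases List.mem_append.mp hp with hp | hp
      · have : p ∉ st.2.1 := fun hm => hpdq (List.mem_append.mpr (Or.inl hm))
        exact List.mem_append.mpr (Or.inl (h4 p hp this hpne q hq hLq'))
      · exfalso
        exact hpdq (List.mem_append.mpr (Or.inr hp))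
    · intro d' hd' hLq'
      rcases List.mem_append.mp hd' with hd' | hd'
      · exact List.mem_append.mpr (Or.inl (hdone d' hd' hLq'))
      · rw [List.mem_singleton.mp hd']
        exact List.mem_append.mpr (Or.inr (List.mem_singleton.mpr rfl))
    · simp [hcnt]

theorem pvFoldA_inv {G : List (List Int)} {p0 : Int × Int}
    {st : List (List (Option Int)) × List (Int × Int) × Int}
    (h : pvStInv G p0 [] st) :
    pvStInv G p0 pvDirections
      (pvDirections.foldl (pvStepA (G.length : Int) ((G.getD 0 []).length : Int) p0.1 p0.2) st) := by
  have h1 := pvStepA_inv (d := ((-1 : Int), (0 : Int))) (by simp [pvDirections]) h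
  have h2 := pvStepA_inv (d := ((1 : Int), (0 : Int))) (by simp [pvDirections]) h1
  have h3 := pvStepA_inv (d := ((0 : Int), (-1 : Int))) (by simp [pvDirections]) h2
  have h4 := pvStepA_inv (d := ((0 : Int), (1 : Int))) (by simp [pvDirections]) h3
  simp only [List.nil_append, List.cons_append] at h4
  simpa [pvDirections, List.foldl] using h4

theorem pvBfsAF_spec (G : List (List Int)) :
    ∀ (fuel : Nat) (g : List (List (Option Int))) (dq : List (Int × Int)) (reach : Int),
    pvOnes g * 2 + dq.length ≤ fuel →
    ∀ M : List (Int × Int), pvMarkInv G M g → M.Nodup →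
    (∀ p ∈ M, pvReach G p) → (∀ q ∈ dq, q ∈ M) →
    (∀ q, pvLand G q → pvBorder G q → q ∈ M) →
    (∀ p ∈ M, p ∉ dq → ∀ q, pvAdj p q → pvLand G q → q ∈ M) →
    reach = (M.length : Int) →
    ∃ M' : List (Int × Int), M'.Nodup ∧ (∀ p, p ∈ M' ↔ pvReach G p) ∧
      pvBfsAF (G.length : Int) ((G.getD 0 []).length : Int) fuel g dq reach = (M'.length : Int) := by
  intro fuel
  induction fuel with
  | zero =>
    intro g dq reach hf M hmi hnd hRe hdq hbd h4 hcnt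
    have hdq0 : dq = [] := List.eq_nil_of_length_eq_zero (by omega)
    subst hdq0
    refine ⟨M, hnd, fun p => ⟨hRe p, fun hr => ?_⟩, by rw [pvBfsAF]; exact hcnt⟩
    induction hr with
    | base q hL hB => exact hbd q hL hB
    | step q q' _ hadj hL ihq => exact h4 q ihq (List.not_mem_nil) q' hadj hL
  | succ fuel ih =>
    intro g dq reach hf M hmi hnd hRe hdq hbd h4 hcnt
    match dq, hf, hdq, h4 with
    | [], hf, hdq, h4 =>
      refine ⟨M, hnd, fun p => ⟨hRe p, fun hr => ?_⟩, by rw [pvBfsAF]; exact hcnt⟩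
      induction hr with
      | base q hL hB => exact hbd q hL hB
      | step q q' _ hadj hL ihq => exact h4 q ihq (List.not_mem_nil) q' hadj hL
    | (r, c) :: rest, hf, hdq, h4 =>
      rw [pvBfsAF]
      have hstart : pvStInv G (r, c) [] (g, rest, reach) := by
        refine ⟨M, hmi, hnd, hdq (r, c) List.mem_cons_self, hRe, ?_, hbd, ?_, ?_, hcnt⟩
        · intro q hq
          exact hdq q (List.mem_cons_of_mem _ hq)
        · intro p hp hprest hpne q hq hLq
          exact h4 p hp
            (fun hm => (List.mem_cons.mp hm).elim (fun e => hpne e) (fun hm => hprest hm)) q hq hLq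
        · intro d hd
          cases hd
      have hfold := pvFoldA_inv hstart
      obtain ⟨M'', hmi'', hnd'', hp0'', hRe'', hdq'', hbd'', h4'', hdone'', hcnt''⟩ := hfold
      have hmeas := pvFoldA_measure (G.length : Int) ((G.getD 0 []).length : Int) r c
        pvDirections (g, rest, reach)
      apply ih _ _ _ (by dsimp only at hmeas ⊢; simp only [List.length_cons] at hf; omega)
        M'' hmi'' hnd'' hRe'' hdq'' hbd''
      · intro p hp hpdq q hq hLq
        by_cases hpe : p = (r, c)
        · subst hpe
          rcases hq with rfl | rfl | rfl | rfl
          · have h := hdone'' ((-1 : Int), (0 : Int)) (by simp [pvDirections])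
              (by simpa [sub_eq_add_neg] using hLq)
            simpa [sub_eq_add_neg] using h
          · have h := hdone'' ((1 : Int), (0 : Int)) (by simp [pvDirections])
              (by simpa using hLq)
            simpa using h
          · have h := hdone'' ((0 : Int), (-1 : Int)) (by simp [pvDirections])
              (by simpa [sub_eq_add_neg] using hLq)
            simpa [sub_eq_add_neg] using h
          · have h := hdone'' ((0 : Int), (1 : Int)) (by simp [pvDirections])
              (by simpa using hLq)
            simpa using h
        · exact h4'' p hp hpdq hpe q hq hLq
      · exact hcnt''

theorem pvBfsA_spec (G : List (List Int)) (g : List (List (Option Int)))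
    (dq : List (Int × Int)) (reach : Int) :
    ∀ M : List (Int × Int), pvMarkInv G M g → M.Nodup →
    (∀ p ∈ M, pvReach G p) → (∀ q ∈ dq, q ∈ M) →
    (∀ q, pvLand G q → pvBorder G q → q ∈ M) →
    (∀ p ∈ M, p ∉ dq → ∀ q, pvAdj p q → pvLand G q → q ∈ M) →
    reach = (M.length : Int) →
    ∃ M' : List (Int × Int), M'.Nodup ∧ (∀ p, p ∈ M' ↔ pvReach G p) ∧
      pvBfsA (G.length : Int) ((G.getD 0 []).length : Int) g dq reach = (M'.length : Int) := by
  intro M hmi hnd hRe hdq hbd h4 hcnt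
  unfold pvBfsA
  exact pvBfsAF_spec G _ g dq reach le_rfl M hmi hnd hRe hdq hbd h4 hcnt

def pvRowCnt (G : List (List Int)) (r : Nat) : Nat :=
  (List.range (G.getD 0 []).length).countP
    (fun (c : Nat) => pvCellB G (r : Int) (((c : Nat)) : Int) == 1)

-- land cells lexicographically before (row a, col b)
def pvCntLex (G : List (List Int)) (a b : Nat) : Nat :=
  ((List.range a).map (pvRowCnt G)).sum +
    (List.range b).countP (fun (c : Nat) => pvCellB G (a : Int) (((c : Nat)) : Int) == 1)

-- invariant of A's initial double loop: rows < a done, row a done up to col b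
def pvScanInv (G : List (List Int)) (a b : Nat)
    (st : Int × List (Int × Int) × List (List (Option Int)) × Int) : Prop :=
  st.2.1.Nodup ∧
  (∀ p, p ∈ st.2.1 ↔
    pvLand G p ∧ pvBorder G p ∧ (p.1 < (a : Int) ∨ (p.1 = (a : Int) ∧ p.2 < (b : Int)))) ∧
  pvMarkInv G st.2.1 st.2.2.1 ∧
  st.2.2.2 = (st.2.1.length : Int) ∧
  st.1 = (pvCntLex G a b : Int)

theorem pvScanCell_inv {G : List (List Int)} {a b : Nat}
    {st : Int × List (Int × Int) × List (List (Option Int)) × Int}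
    (ha : a < G.length) (hb : b < (G.getD 0 []).length) (h : pvScanInv G a b st) :
    pvScanInv G a (b + 1)
      (pvScanCell (G.length : Int) ((G.getD 0 []).length : Int) (a : Int) (b : Int) st) := by
  obtain ⟨hnd, hmem, hmi, hrc, htot⟩ := h
  have hab : ((a : Int), (b : Int)) ∉ st.2.1 := by
    intro hm
    have := (hmem _).mp hm
    omega
  have hread : pvCellA st.2.2.1 (a : Int) (b : Int) = some (pvCellB G (a : Int) (b : Int)) := by
    rw [pvMarkInv_read hmi (by positivity) (by positivity), if_neg hab]
  unfold pvScanCell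
  by_cases hcell : pvCellB G (a : Int) (b : Int) = 1
  · rw [if_pos (by rw [hread, hcell])]
    have hL : pvLand G ((a : Int), (b : Int)) := (pvLand_iff rfl rfl).mp
      ⟨by positivity, by exact_mod_cast ha, by positivity, by exact_mod_cast hb, hcell⟩
    have hBiff : ((a : Int) ∈ ([0, (G.length : Int) - 1] : List Int) ∨
        (b : Int) ∈ ([0, ((G.getD 0 []).length : Int) - 1] : List Int)) ↔
        pvBorder G ((a : Int), (b : Int)) := by
      unfold pvBorder
      simp [List.mem_cons]
      tauto
    have hcnt1 : (pvCntLex G a (b + 1) : Int) = (pvCntLex G a b : Int) + 1 := by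
      unfold pvCntLex
      rw [List.range_succ, List.countP_append]
      simp [hcell]
      ring
    by_cases hB : pvBorder G ((a : Int), (b : Int))
    · rw [if_pos (hBiff.mpr hB)]
      refine ⟨?_, ?_, pvMarkInv_mark hmi (by positivity) (by positivity) (by rw [hread, hcell]), ?_, ?_⟩
      · exact List.Nodup.append hnd (List.nodup_singleton _)
          (fun x hx he => hab (by rwa [List.mem_singleton.mp he] at hx))
      · intro p
        rw [List.mem_append, hmem p, List.mem_singleton]
        constructor
        · rintro (⟨hpL, hpB, hlex⟩ | rfl)
          · exact ⟨hpL, hpB, by push_cast; omega⟩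
          · exact ⟨hL, hB, by push_cast; omega⟩
        · rintro ⟨hpL, hpB, hlex⟩
          by_cases hpe : p = ((a : Int), (b : Int))
          · exact Or.inr hpe
          · left
            refine ⟨hpL, hpB, ?_⟩
            have hne : p.1 ≠ (a : Int) ∨ p.2 ≠ (b : Int) := by
              by_contra hc
              push Not at hc
              exact hpe (Prod.ext hc.1 hc.2)
            push_cast at hlex ⊢
            omega
      · simp [hrc]
      · simp only []
        rw [htot, hcnt1]
    · rw [if_neg (fun hc => hB (hBiff.mp hc))]
      refine ⟨hnd, ?_, hmi, hrc, ?_⟩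
      · intro p
        rw [hmem p]
        constructor
        · rintro ⟨hpL, hpB, hlex⟩
          exact ⟨hpL, hpB, by push_cast at hlex ⊢; omega⟩
        · rintro ⟨hpL, hpB, hlex⟩
          refine ⟨hpL, hpB, ?_⟩
          by_cases hpe : p = ((a : Int), (b : Int))
          · exact absurd (hpe ▸ hpB) hB
          · have hne : p.1 ≠ (a : Int) ∨ p.2 ≠ (b : Int) := by
              by_contra hc
              push Not at hc
              exact hpe (Prod.ext hc.1 hc.2)
            push_cast at hlex ⊢
            omega
      · simp only []
        rw [htot, hcnt1]
  · rw [if_neg (by rw [hread]; simp [hcell])]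
    refine ⟨hnd, ?_, hmi, hrc, ?_⟩
    · intro p
      rw [hmem p]
      constructor
      · rintro ⟨hpL, hpB, hlex⟩
        exact ⟨hpL, hpB, by push_cast at hlex ⊢; omega⟩
      · rintro ⟨hpL, hpB, hlex⟩
        refine ⟨hpL, hpB, ?_⟩
        by_cases hpe : p = ((a : Int), (b : Int))
        · exact absurd (hpe ▸ hpL).2.2.2.2 hcell
        · have hne : p.1 ≠ (a : Int) ∨ p.2 ≠ (b : Int) := by
            by_contra hc
            push Not at hc
            exact hpe (Prod.ext hc.1 hc.2)
          push_cast at hlex ⊢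
          omega
    · rw [htot]
      unfold pvCntLex
      rw [List.range_succ, List.countP_append]
      simp [hcell]

theorem pvScanRowAux {G : List (List Int)} {a : Nat}
    {st : Int × List (Int × Int) × List (List (Option Int)) × Int}
    (ha : a < G.length) (h : pvScanInv G a 0 st) :
    ∀ k, k ≤ (G.getD 0 []).length →
      pvScanInv G a k ((List.range k).foldl
        (fun st (c : Nat) =>
          pvScanCell (G.length : Int) ((G.getD 0 []).length : Int) (a : Int) (c : Int) st) st) := by
  intro k
  induction k with
  | zero => intro _; simpa using h
  | succ m ih =>
    intro hk
    rw [List.range_succ, List.foldl_append]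
    simpa using pvScanCell_inv ha (by omega) (ih (by omega))

theorem pvScanRow_inv {G : List (List Int)} {a : Nat}
    {st : Int × List (Int × Int) × List (List (Option Int)) × Int}
    (ha : a < G.length) (h : pvScanInv G a 0 st) :
    pvScanInv G a (G.getD 0 []).length
      (pvScanRow (G.length : Int) ((G.getD 0 []).length : Int) (a : Int) st) := by
  unfold pvScanRow
  rw [PySem.List.pyRange_zero_natCast, List.foldl_map]
  exact pvScanRowAux ha h _ le_rfl

theorem pvScanShift {G : List (List Int)} {a : Nat}
    {st : Int × List (Int × Int) × List (List (Option Int)) × Int}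
    (h : pvScanInv G a (G.getD 0 []).length st) : pvScanInv G (a + 1) 0 st := by
  obtain ⟨hnd, hmem, hmi, hrc, htot⟩ := h
  refine ⟨hnd, ?_, hmi, hrc, ?_⟩
  · intro p
    rw [hmem p]
    constructor
    · rintro ⟨hpL, hpB, hlex⟩
      exact ⟨hpL, hpB, by push_cast at hlex ⊢; omega⟩
    · rintro ⟨hpL, hpB, hlex⟩
      refine ⟨hpL, hpB, ?_⟩
      have h2 := hpL.2.2.2.1
      have h3 := hpL.2.2.1
      push_cast at hlex ⊢
      omega
  · rw [htot]
    unfold pvCntLex pvRowCnt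
    rw [List.range_succ, List.map_append]
    simp

theorem pvScanInit (G : List (List Int)) :
    pvScanInv G 0 0
      ((0 : Int), ([] : List (Int × Int)), G.map (fun row => row.map some), (0 : Int)) := by
  refine ⟨List.nodup_nil, ?_, pvMarkInv_init G, by simp, by simp [pvCntLex]⟩
  intro p
  simp only [List.not_mem_nil, false_iff]
  rintro ⟨hpL, _, hlex⟩
  have h1 := hpL.1
  have h2 := hpL.2.2.1
  push_cast at hlex
  omega

theorem pvScanOuterAux (G : List (List Int)) :
    ∀ k, k ≤ G.length →
      pvScanInv G k 0 ((List.range k).foldl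
        (fun st (r : Nat) => pvScanRow (G.length : Int) ((G.getD 0 []).length : Int) (r : Int) st)
        ((0 : Int), ([] : List (Int × Int)), G.map (fun row => row.map some), (0 : Int))) := by
  intro k
  induction k with
  | zero => intro _; simpa using pvScanInit G
  | succ m ih =>
    intro hk
    rw [List.range_succ, List.foldl_append]
    exact pvScanShift (by simpa using pvScanRow_inv (by omega) (ih (by omega)))

theorem pvScan_spec (G : List (List Int)) :
    (((PySem.List.pyRange 0 (G.length : Int) 1).foldl
        (fun st r => pvScanRow (G.length : Int) ((G.getD 0 []).length : Int) r st)
        ((0 : Int), ([] : List (Int × Int)), G.map (fun row => row.map some),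
          (0 : Int))).2.1.Nodup) ∧
    (∀ p, p ∈ ((PySem.List.pyRange 0 (G.length : Int) 1).foldl
        (fun st r => pvScanRow (G.length : Int) ((G.getD 0 []).length : Int) r st)
        ((0 : Int), ([] : List (Int × Int)), G.map (fun row => row.map some),
          (0 : Int))).2.1 ↔ pvLand G p ∧ pvBorder G p) ∧
    pvMarkInv G ((PySem.List.pyRange 0 (G.length : Int) 1).foldl
        (fun st r => pvScanRow (G.length : Int) ((G.getD 0 []).length : Int) r st)
        ((0 : Int), ([] : List (Int × Int)), G.map (fun row => row.map some),
          (0 : Int))).2.1 ((PySem.List.pyRange 0 (G.length : Int) 1).foldl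
        (fun st r => pvScanRow (G.length : Int) ((G.getD 0 []).length : Int) r st)
        ((0 : Int), ([] : List (Int × Int)), G.map (fun row => row.map some),
          (0 : Int))).2.2.1 ∧
    ((PySem.List.pyRange 0 (G.length : Int) 1).foldl
        (fun st r => pvScanRow (G.length : Int) ((G.getD 0 []).length : Int) r st)
        ((0 : Int), ([] : List (Int × Int)), G.map (fun row => row.map some),
          (0 : Int))).2.2.2 = (((PySem.List.pyRange 0 (G.length : Int) 1).foldl
        (fun st r => pvScanRow (G.length : Int) ((G.getD 0 []).length : Int) r st)
        ((0 : Int), ([] : List (Int × Int)), G.map (fun row => row.map some),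
          (0 : Int))).2.1.length : Int) ∧
    ((PySem.List.pyRange 0 (G.length : Int) 1).foldl
        (fun st r => pvScanRow (G.length : Int) ((G.getD 0 []).length : Int) r st)
        ((0 : Int), ([] : List (Int × Int)), G.map (fun row => row.map some),
          (0 : Int))).1 = ((((List.range G.length).map (pvRowCnt G)).sum : Nat) : Int) := by
  simp only [PySem.List.pyRange_zero_natCast, List.foldl_map]
  obtain ⟨hnd, hmem, hmi, hrc, htot⟩ := pvScanOuterAux G G.length le_rfl
  refine ⟨hnd, ?_, hmi, hrc, by rw [htot]; simp [pvCntLex]⟩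
  intro p
  rw [hmem p]
  constructor
  · rintro ⟨hpL, hpB, _⟩
    exact ⟨hpL, hpB⟩
  · rintro ⟨hpL, hpB⟩
    exact ⟨hpL, hpB, Or.inl hpL.2.1⟩

theorem pvMapRangeGetD {β : Type} (G : List (List Int)) (f : List Int → β) :
    (List.range G.length).map (fun r => f (G.getD r [])) = G.map f := by
  apply List.ext_getElem (by simp)
  intro i h1 h2
  simp only [List.getElem_map, List.getElem_range]
  rw [List.getD_eq_getElem _ _ (by simpa using h2)]

theorem pvInnerCount (C : Nat) (row : List Int) (t : Int) :
    (PySem.List.pyRange 0 (C : Int) 1).foldl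
      (fun t c => if row.getD c.toNat 0 = 1 then t + 1 else t) t =
    t + ((List.range C).countP (fun (c : Nat) => row.getD c 0 == 1) : Int) := by
  rw [PySem.List.pyRange_zero_natCast, List.foldl_map]
  have hfun : (fun (t : Int) (k : Nat) => if row.getD ((k : Int)).toNat 0 = 1 then t + 1 else t)
      = (fun (t : Int) (k : Nat) =>
          if (fun (k : Nat) => row.getD k 0 == 1) k = true then t + 1 else t) := by
    funext t k
    simp [beq_iff_eq]
  rw [hfun, PySem.List.foldl_count_if]

theorem pvTotalB (G : List (List Int)) :
    G.foldl (fun t row =>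
      (PySem.List.pyRange 0 (((G.getD 0 []).length : Nat) : Int) 1).foldl
        (fun t c => if row.getD c.toNat 0 = 1 then t + 1 else t) t) 0 =
    ((((List.range G.length).map (pvRowCnt G)).sum : Nat) : Int) := by
  have hfun : (fun (t : Int) (row : List Int) =>
      (PySem.List.pyRange 0 (((G.getD 0 []).length : Nat) : Int) 1).foldl
        (fun t c => if row.getD c.toNat 0 = 1 then t + 1 else t) t)
      = (fun (t : Int) (row : List Int) => t +
          (((List.range (G.getD 0 []).length).countP
            (fun (c : Nat) => row.getD c 0 == 1) : Nat) : Int)) := by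
    funext t row
    exact pvInnerCount _ row t
  rw [hfun, PySem.List.foldl_add]
  have hrow : ∀ r : Nat, pvRowCnt G r =
      (List.range (G.getD 0 []).length).countP (fun (c : Nat) => (G.getD r []).getD c 0 == 1) := by
    intro r
    unfold pvRowCnt
    apply List.countP_congr
    intro c _
    simp [pvCellB]
  have hmap : (List.range G.length).map (pvRowCnt G) =
      G.map (fun row => (List.range (G.getD 0 []).length).countP
        (fun (c : Nat) => row.getD c 0 == 1)) := by
    rw [← pvMapRangeGetD G
      (fun row => (List.range (G.getD 0 []).length).countP (fun (c : Nat) => row.getD c 0 == 1))]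
    apply List.map_congr_left
    intro r _
    exact hrow r
  rw [hmap]
  rw [Nat.cast_list_sum, List.map_map]
  simp only [Function.comp_def]
  omega

theorem num_of_enclaves_eq_alt (grid : List (List Int)) :
    num_of_enclaves grid = num_of_enclaves_alt grid := by
  unfold num_of_enclaves num_of_enclaves_alt
  dsimp only
  obtain ⟨hndA, hmemA, hmiA, hrcA, htotA⟩ := pvScan_spec grid
  -- run A's BFS from the scanned state
  obtain ⟨MA, hndMA, hiffA, heqA⟩ :=
    pvBfsA_spec grid _ _ _ _ hmiA hndA
      (fun p hp => pvReach.base p ((hmemA p).mp hp).1 ((hmemA p).mp hp).2)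
      (fun q hq => hq)
      (fun q hLq hBq => (hmemA q).mpr ⟨hLq, hBq⟩)
      (fun p hp hnp => absurd hp hnp)
      hrcA
  -- run B's sweep fixpoint from the empty set
  obtain ⟨hndB, hiffB⟩ :=
    pvFix_spec grid [] List.nodup_nil (fun p hp => absurd hp (List.not_mem_nil))
  -- the two collected sets have the same members, hence the same size
  have hperm := (List.perm_ext_iff_of_nodup hndMA hndB).mpr
    (fun a => by rw [hiffA a, hiffB a])
  rw [htotA, heqA, pvTotalB grid, hperm.length_eq]

-- ===== VERDICT (by name: the statement is the Claim_ definition above) =====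
theorem num_of_enclaves_spec : Claim_equal_num_of_enclaves := by
  intro grid _ _
  unfold Spec_num_of_enclaves
  exact num_of_enclaves_eq_alt grid
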